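-- pv_equiv track=rewrite | github.com/anthon793/e-library | app/services/category_policy.py | slug_from_category
-- ===== SOURCE A (Python) =====
-- SLUG_TO_NAME = {
--     "cybersecurity": "Cybersecurity",
--     "data-science": "Data Science",
--     "artificial-intelligence": "Artificial Intelligence",
--     "information-systems": "Information Systems",
--     "computer-science": "Computer Science",
-- }
--
-- _ALIAS_TO_SLUG = {
--     "cybersecurity": "cybersecurity",
--     "cyber security": "cybersecurity",
--     "cyber-security": "cybersecurity",
--     "data science": "data-science",
--     "data-science": "data-science",
--     "datascience": "data-science",
--     "artificial intelligence": "artificial-intelligence",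
--     "artificial-intelligence": "artificial-intelligence",
--     "ai": "artificial-intelligence",
--     "a.i": "artificial-intelligence",
--     "information systems": "information-systems",
--     "information-systems": "information-systems",
--     "information system": "information-systems",
--     "infosystems": "information-systems",
--     "is": "information-systems",
--     "computer science": "computer-science",
--     "computer-science": "computer-science",
--     "cs": "computer-science",
--     "c.s": "computer-science",
--     "computing": "computer-science",
-- }
--
-- def normalize_category(value: str | None) -> str | None:
--     if not value:
--         return None
--     key = str(value).strip().lower().replace("_", " ")
--     slug = _ALIAS_TO_SLUG.get(key)
--     if not slug:
--         key2 = key.replace(" ", "-")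
--         slug = _ALIAS_TO_SLUG.get(key2)
--     if not slug:
--         return None
--     return SLUG_TO_NAME.get(slug)
--
-- def slug_from_category(value: str | None) -> str | None:
--     normalized = normalize_category(value)
--     if not normalized:
--         return None
--     for slug, name in SLUG_TO_NAME.items():
--         if name == normalized:
--             return slug
--     return None
-- ===== SOURCE B (Python) =====
-- _ALIAS_TO_SLUG = {
--     "cybersecurity": "cybersecurity",
--     "cyber security": "cybersecurity",
--     "cyber-security": "cybersecurity",
--     "data science": "data-science",
--     "data-science": "data-science",
--     "datascience": "data-science",
--     "artificial intelligence": "artificial-intelligence",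
--     "artificial-intelligence": "artificial-intelligence",
--     "ai": "artificial-intelligence",
--     "a.i": "artificial-intelligence",
--     "information systems": "information-systems",
--     "information-systems": "information-systems",
--     "information system": "information-systems",
--     "infosystems": "information-systems",
--     "is": "information-systems",
--     "computer science": "computer-science",
--     "computer-science": "computer-science",
--     "cs": "computer-science",
--     "c.s": "computer-science",
--     "computing": "computer-science",
-- }
--
-- def slug_from_category(value):
--     # Single alias lookup: every alias already maps to the canonical slug,
--     # so the name round-trip and the reverse scan of A are unnecessary.
--     if not value:
--         return None
--     key = str(value).strip().lower().replace("_", " ")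
--     return _ALIAS_TO_SLUG.get(key) or _ALIAS_TO_SLUG.get(key.replace(" ", "-"))
-- ===== Notes on version B (the rewrite author's own statement) =====
-- stated objective: simpler
-- what changed: B returns the alias-table slug directly, dropping normalize_category's slug->name round-trip and the reverse name->slug scan over SLUG_TO_NAME entirely.
import Mathlib
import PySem

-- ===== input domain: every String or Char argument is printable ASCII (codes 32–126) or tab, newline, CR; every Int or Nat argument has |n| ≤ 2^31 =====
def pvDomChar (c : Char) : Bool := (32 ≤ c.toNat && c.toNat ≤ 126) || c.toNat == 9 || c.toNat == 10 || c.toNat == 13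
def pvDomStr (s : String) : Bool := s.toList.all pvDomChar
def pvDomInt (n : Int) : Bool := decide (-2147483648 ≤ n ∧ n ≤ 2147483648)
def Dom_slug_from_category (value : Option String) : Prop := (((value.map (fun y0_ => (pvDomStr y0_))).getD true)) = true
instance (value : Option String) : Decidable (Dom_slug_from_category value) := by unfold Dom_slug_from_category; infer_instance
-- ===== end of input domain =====

-- B replaces A's alias→slug→name→slug round-trip by a single alias lookup (simpler).

-- ===== PORT A =====
def pvSlugToName : PySem.Dict String String := PySem.Dict.ofList
  [("cybersecurity", "Cybersecurity"),
   ("data-science", "Data Science"),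
   ("artificial-intelligence", "Artificial Intelligence"),
   ("information-systems", "Information Systems"),
   ("computer-science", "Computer Science")]

def pvAliasToSlug : PySem.Dict String String := PySem.Dict.ofList
  [("cybersecurity", "cybersecurity"),
   ("cyber security", "cybersecurity"),
   ("cyber-security", "cybersecurity"),
   ("data science", "data-science"),
   ("data-science", "data-science"),
   ("datascience", "data-science"),
   ("artificial intelligence", "artificial-intelligence"),
   ("artificial-intelligence", "artificial-intelligence"),
   ("ai", "artificial-intelligence"),
   ("a.i", "artificial-intelligence"),
   ("information systems", "information-systems"),
   ("information-systems", "information-systems"),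
   ("information system", "information-systems"),
   ("infosystems", "information-systems"),
   ("is", "information-systems"),
   ("computer science", "computer-science"),
   ("computer-science", "computer-science"),
   ("cs", "computer-science"),
   ("c.s", "computer-science"),
   ("computing", "computer-science")]

def normalize_category (value : Option String) : Option String :=
  match value with
  | none => none                                   -- 'if not value: return None' (None case)
  | some s =>
    if s = "" then none                            -- 'if not value: return None' ("" case)
    else
      let key := PySem.Str.replace (PySem.Str.lower (PySem.Str.strip s)) "_" " "
      let slug := pvAliasToSlug.get? key
      let slug := if slug = none ∨ slug = some ""  -- 'if not slug:'
                  then pvAliasToSlug.get? (PySem.Str.replace key " " "-")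
                  else slug
      match slug with
      | none => none
      | some sl => if sl = "" then none else pvSlugToName.get? sl

-- the 'for slug, name in SLUG_TO_NAME.items()' loop of A
def pvFindSlug : List (String × String) → String → Option String
  | [], _ => none
  | (slug, name) :: rest, normalized =>
      if name = normalized then some slug else pvFindSlug rest normalized

def slug_from_category (value : Option String) : Option String :=
  match normalize_category value with
  | none => none                                   -- 'if not normalized: return None'
  | some n => if n = "" then none else pvFindSlug pvSlugToName.items n

-- ===== PORT B =====
def slug_from_category_alt (value : Option String) : Option String :=
  match value with
  | none => none
  | some s =>
    if s = "" then none
    else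
      let key := PySem.Str.replace (PySem.Str.lower (PySem.Str.strip s)) "_" " "
      let a := pvAliasToSlug.get? key
      -- Python 'a or b' on Optional[str]: a unless a is falsy (None or "")
      if a = none ∨ a = some "" then pvAliasToSlug.get? (PySem.Str.replace key " " "-") else a

-- ===== PRECONDITION & SPEC =====
def Spec_slug_from_category (value : Option String) (out : Option String) : Prop := out = slug_from_category_alt value
instance (value : Option String) (out : Option String) : Decidable (Spec_slug_from_category value out) := by unfold Spec_slug_from_category; infer_instance

-- ===== CLAIM (what is proved, stated in full; the proofs are below) =====
def Claim_equal_slug_from_category : Prop := ∀ (value : Option String), Dom_slug_from_category value → Spec_slug_from_category value (slug_from_category value)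

-- ===== LEMMAS AND PROOFS =====

-- any value ever returned by get? on a literal dict is one of its stored values
theorem get?_mk_mem_snd (l : List (String × String)) (k v : String)
    (h : (PySem.Dict.mk l).get? k = some v) : v ∈ l.map Prod.snd := by
  induction l with
  | nil => simp [PySem.Dict.get?] at h
  | cons p rest ih =>
    obtain ⟨a, b⟩ := p
    rw [PySem.Dict.get?_mk_cons] at h
    by_cases hk : a == k
    · simp [hk] at h; simp [h]
    · simp [hk] at h; exact List.mem_cons_of_mem _ (ih h)

-- for every slug stored in the alias table, it is nonempty and A's tail
-- (name lookup + reverse scan) gives it back unchanged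
theorem alias_value_roundtrip :
    ∀ v ∈ (pvAliasToSlug.items.map Prod.snd),
      v ≠ "" ∧
      (match pvSlugToName.get? v with
       | none => none
       | some n => if n = "" then none else pvFindSlug pvSlugToName.items n) = some v := by
  decide

theorem slug_from_category_agree (value : Option String) :
    slug_from_category value = slug_from_category_alt value := by
  cases value with
  | none => rfl
  | some s =>
    unfold slug_from_category normalize_category slug_from_category_alt
    by_cases hs : s = ""
    · simp [hs]
    · simp only [hs, if_false]
      set key := PySem.Str.replace (PySem.Str.lower (PySem.Str.strip s)) "_" " " with hkey
      cases h1 : pvAliasToSlug.get? key with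
      | some v =>
        have hv := alias_value_roundtrip v (get?_mk_mem_snd _ key v h1)
        have hne : ¬ ((some v : Option String) = none ∨ (some v : Option String) = some "") := by
          simp [hv.1]
        simp only [hne, if_false]
        simp only [if_neg hv.1]
        exact hv.2
      | none =>
        simp only [true_or, if_true]
        cases h2 : pvAliasToSlug.get? (PySem.Str.replace key " " "-") with
        | none => rfl
        | some v =>
          have hv := alias_value_roundtrip v (get?_mk_mem_snd _ _ v h2)
          simp only [if_neg hv.1]
          exact hv.2

-- ===== VERDICT (by name: the statement is the Claim_ definition above) =====
theorem slug_from_category_spec : Claim_equal_slug_from_category := by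
  intro value _
  unfold Spec_slug_from_category
  exact slug_from_category_agree value
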